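-- pv_equiv track=rewrite | github.com/ianweatherburn/UHF-Remuxer | remux_watcher/monitor.py | _clean_filename
-- ===== SOURCE A (Python) =====
-- def _clean_filename(name: str) -> str:
--     """Clean a string to be used in a filename."""
--     # Replace invalid characters
--     invalid_chars = '<>:"/\\|?*'
--     for char in invalid_chars:
--         name = name.replace(char, '_')
--
--     # Remove leading/trailing spaces and dots
--     name = name.strip(' .')
--
--     # If name is empty, use a placeholder
--     if not name:
--         name = "unnamed"
--
--     return name
-- ===== SOURCE B (Python) =====
-- def _clean_filename(name: str) -> str:
--     """Clean a string to be used in a filename."""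
--     # Trim leading/trailing spaces and dots FIRST with an explicit two-pointer
--     # scan (correct to reorder: the replacement below maps ' ' and '.' to
--     # themselves and never produces a space or dot).
--     lo, hi = 0, len(name)
--     while lo < hi and name[lo] in ' .':
--         lo += 1
--     while hi > lo and name[hi - 1] in ' .':
--         hi -= 1
--     if lo == hi:
--         return "unnamed"
--     # One replacement pass over only the trimmed window.
--     return ''.join('_' if c in '<>:"/\\|?*' else c for c in name[lo:hi])
-- ===== Notes on version B (the rewrite author's own statement) =====
-- stated objective: alternative
-- what changed: Instead of nine full-string replace passes followed by str.strip and an emptiness check, B trims leading/trailing spaces and dots first with an explicit two-pointer scan over the original string, returns the placeholder early, and then makes a single replacement pass over only the trimmed window (reordering is valid because the replacement fixes space and dot and never produces them).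
import Mathlib
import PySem

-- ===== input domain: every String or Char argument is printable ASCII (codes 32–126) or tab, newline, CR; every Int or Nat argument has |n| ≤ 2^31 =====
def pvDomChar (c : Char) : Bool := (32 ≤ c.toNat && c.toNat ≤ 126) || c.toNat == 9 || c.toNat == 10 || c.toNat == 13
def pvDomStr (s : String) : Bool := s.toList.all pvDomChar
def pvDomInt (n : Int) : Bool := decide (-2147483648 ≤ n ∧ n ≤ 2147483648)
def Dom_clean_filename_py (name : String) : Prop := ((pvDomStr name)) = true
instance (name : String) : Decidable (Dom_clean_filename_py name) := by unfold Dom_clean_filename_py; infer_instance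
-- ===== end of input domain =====

-- B trims ' .' first with an explicit two-pointer scan, returns the placeholder early, and then
-- makes a single replacement pass over only the trimmed window (a different staging of the work).

-- ===== PORT A =====
def clean_filename_py (name : String) : String :=
  -- for char in '<>:"/\\|?*': name = name.replace(char, '_')
  let name1 := "<>:\"/\\|?*".toList.foldl
    (fun s c => PySem.Str.replace s (String.ofList [c]) "_") name
  -- name = name.strip(' .')
  let name2 := PySem.Str.stripChars name1 " ."
  -- if not name: name = "unnamed"
  if PySem.Str.len name2 = 0 then "unnamed" else name2

-- ===== PORT B =====
def pvIsTrim (c : Char) : Bool := c == ' ' || c == '.'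
def pvBad (c : Char) : Bool := "<>:\"/\\|?*".toList.contains c

def clean_filename_py_alt (name : String) : String :=
  let cs := name.toList
  -- while lo < hi and name[lo] in ' .': lo += 1   (advance the left pointer)
  let t1 := cs.dropWhile pvIsTrim
  -- while hi > lo and name[hi-1] in ' .': hi -= 1  (retreat the right pointer)
  let t2 := (t1.reverse.dropWhile pvIsTrim).reverse
  -- if lo == hi: return "unnamed"
  if t2.isEmpty then "unnamed"
  -- ''.join('_' if c in '<>:"/\\|?*' else c for c in name[lo:hi])
  else String.ofList (t2.map (fun c => if pvBad c then '_' else c))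

-- ===== PRECONDITION & SPEC =====
def Spec_clean_filename_py (name : String) (out : String) : Prop := out = clean_filename_py_alt name
instance (name : String) (out : String) : Decidable (Spec_clean_filename_py name out) := by unfold Spec_clean_filename_py; infer_instance

-- ===== CLAIM (what is proved, stated in full; the proofs are below) =====
def Claim_equal_clean_filename_py : Prop := ∀ (name : String), Dom_clean_filename_py name → Spec_clean_filename_py name (clean_filename_py name)

-- ===== LEMMAS AND PROOFS =====

/-- replacing the single character `c` by `'_'` is a pointwise map -/
def pvRepl (c : Char) (s : List Char) : List Char := s.map (fun x => if x = c then '_' else x)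

theorem pv_go_single (c : Char) : ∀ (fuel : Nat) (s acc : List Char), s.length ≤ fuel →
    PySem.Chars.replace.go [c] ['_'] fuel s acc = acc.reverse ++ pvRepl c s := by
  intro fuel
  induction fuel with
  | zero =>
    intro s acc h
    have hs : s = [] := List.eq_nil_of_length_eq_zero (Nat.le_zero.mp h)
    subst hs; simp [PySem.Chars.replace.go, pvRepl]
  | succ n ih =>
    intro s acc h
    cases s with
    | nil => simp [PySem.Chars.replace.go, pvRepl]
    | cons d t =>
      rw [PySem.Chars.replace.go]
      by_cases hd : d = c
      · subst hd
        simp only [List.isPrefixOf, BEq.rfl, Bool.and_self, if_true]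
        rw [show List.drop [d].length (d :: t) = t from rfl,
            show (['_'].reverse ++ acc) = ('_' :: acc) from rfl,
            ih t ('_' :: acc) (by simpa using Nat.lt_succ_iff.mp (by simpa using h))]
        simp [pvRepl]
      · have : ([c].isPrefixOf (d :: t)) = false := by
          simp [List.isPrefixOf]
          exact fun hcd => absurd hcd.symm hd
        rw [this]
        simp only [Bool.false_eq_true, if_false]
        rw [ih t (d :: acc) (by simpa using Nat.lt_succ_iff.mp (by simpa using h))]
        simp [pvRepl, hd]

theorem pv_replace_single (c : Char) (s : List Char) :
    PySem.Chars.replace s [c] ['_'] = pvRepl c s := by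
  rw [PySem.Chars.replace]
  simp only [List.isEmpty_cons, Bool.false_eq_true, if_false]
  simpa using pv_go_single c s.length s [] le_rfl

theorem pv_fold_repl (cs : List Char) : ∀ s : List Char,
    cs.foldl (fun l c => pvRepl c l) s = s.map (fun x => if cs.contains x then '_' else x) := by
  induction cs with
  | nil => intro s; simp
  | cons c cs ih =>
    intro s
    rw [List.foldl_cons, ih (pvRepl c s)]
    unfold pvRepl
    rw [List.map_map]
    apply List.map_congr_left
    intro x _
    by_cases hx : x = c <;> simp [hx]

theorem pv_fold_toList (cs : List Char) : ∀ s : String,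
    (cs.foldl (fun s c => PySem.Str.replace s (String.ofList [c]) "_") s).toList
      = cs.foldl (fun l c => pvRepl c l) s.toList := by
  induction cs with
  | nil => intro s; simp
  | cons c cs ih =>
    intro s
    rw [List.foldl_cons, List.foldl_cons, ih]
    congr 1
    rw [PySem.Str.toList_replace, String.toList_ofList,
        show ("_" : String).toList = ['_'] from rfl]
    exact pv_replace_single c s.toList

/-- A's nine replace passes are one pointwise map by `pvBad`. -/
theorem pv_stage1_toList (name : String) :
    ("<>:\"/\\|?*".toList.foldl (fun s c => PySem.Str.replace s (String.ofList [c]) "_") name).toList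
      = name.toList.map (fun c => if pvBad c then '_' else c) := by
  rw [pv_fold_toList, pv_fold_repl]
  rfl

/-- trimming ' .' commutes with the replacement map: ' ' and '.' are fixed points and never produced -/
theorem pv_trim_of_repl (c : Char) :
    pvIsTrim (if pvBad c then '_' else c) = pvIsTrim c := by
  by_cases h : pvBad c = true
  · have : c = '<' ∨ c = '>' ∨ c = ':' ∨ c = '"' ∨ c = '/' ∨ c = '\\' ∨ c = '|' ∨ c = '?' ∨ c = '*' := by
      simpa [pvBad, List.contains_eq_mem] using h
    rcases this with h|h|h|h|h|h|h|h|h <;> subst h <;> simp [pvIsTrim, pvBad]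
  · simp [h]

theorem pv_dropWhile_map_repl (l : List Char) :
    (l.map (fun c => if pvBad c then '_' else c)).dropWhile pvIsTrim
      = (l.dropWhile pvIsTrim).map (fun c => if pvBad c then '_' else c) := by
  rw [List.dropWhile_map,
      show (pvIsTrim ∘ fun c => if pvBad c then '_' else c) = pvIsTrim from funext pv_trim_of_repl]

-- ===== VERDICT (by name: the statement is the Claim_ definition above) =====
theorem clean_filename_py_spec : Claim_equal_clean_filename_py := by
  intro name _
  unfold Spec_clean_filename_py clean_filename_py clean_filename_py_alt
  simp only []
  have hstrip :
      (PySem.Str.stripChars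
        ("<>:\"/\\|?*".toList.foldl (fun s c => PySem.Str.replace s (String.ofList [c]) "_") name)
        " .").toList
      = ((name.toList.dropWhile pvIsTrim).reverse.dropWhile pvIsTrim).reverse.map
          (fun c => if pvBad c then '_' else c) := by
    rw [PySem.Str.toList_stripChars, PySem.Chars.stripChars, pv_stage1_toList]
    have hp : (fun c => (" .".toList).contains c) = pvIsTrim := by
      funext c; simp [pvIsTrim, List.contains_eq_mem]; tauto
    rw [hp, pv_dropWhile_map_repl, ← List.map_reverse, pv_dropWhile_map_repl, ← List.map_reverse]
  generalize hs2 : PySem.Str.stripChars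
      ("<>:\"/\\|?*".toList.foldl (fun s c => PySem.Str.replace s (String.ofList [c]) "_") name)
      " ." = s2 at hstrip ⊢
  generalize ht2 : ((name.toList.dropWhile pvIsTrim).reverse.dropWhile pvIsTrim).reverse = t2 at hstrip ⊢
  have hlen : PySem.Str.len s2 = (t2.length : Int) := by
    rw [PySem.Str.len_eq, hstrip, List.length_map]
  by_cases he : t2.isEmpty
  · have h0 : PySem.Str.len s2 = 0 := by
      rw [hlen, List.isEmpty_iff.mp he]; rfl
    rw [if_pos h0, if_pos he]
  · have h0 : ¬ PySem.Str.len s2 = 0 := by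
      rw [hlen]
      have : t2 ≠ [] := fun h => he (by simp [h])
      simpa using List.length_pos_of_ne_nil this |>.ne'
    rw [if_neg h0, if_neg he, ← hstrip, String.ofList_toList]
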